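-- pv_equiv track=rewrite | github.com/owenparris/Poker-Hand-Evaluator | poker_hand_eval.py | analyze_hand
-- ===== SOURCE A (Python) =====
-- CARD_RANK = [(c >> 2) + 2 for c in range(52)]
--
-- CARD_SUIT = [c & 3 for c in range(52)]
--
-- def analyze_hand(hand):
--     rank_counts = [0]*15
--     cards_by_suit = [[],[],[],[]]
--
--     for card in hand:
--         rnk = CARD_RANK[card]
--         idx = CARD_SUIT[card]
--         rank_counts[rnk] += 1
--         cards_by_suit[idx].append(rnk)
--
--     return rank_counts, cards_by_suit
-- ===== SOURCE B (Python) =====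
-- CARD_RANK = [(c >> 2) + 2 for c in range(52)]
--
-- CARD_SUIT = [c & 3 for c in range(52)]
--
-- def analyze_hand(hand):
--     rank_counts = [0]*15
--     for card in hand:
--         rank_counts[CARD_RANK[card]] += 1
--     cards_by_suit = [[CARD_RANK[c] for c in hand if CARD_SUIT[c] == s] for s in range(4)]
--     return rank_counts, cards_by_suit
-- ===== Notes on version B (the rewrite author's own statement) =====
-- stated objective: alternative
-- what changed: Replaces A's single combined bucketing pass with a separate rank-tally loop plus four independent per-suit filtering comprehensions over the hand.
import Mathlib
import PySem

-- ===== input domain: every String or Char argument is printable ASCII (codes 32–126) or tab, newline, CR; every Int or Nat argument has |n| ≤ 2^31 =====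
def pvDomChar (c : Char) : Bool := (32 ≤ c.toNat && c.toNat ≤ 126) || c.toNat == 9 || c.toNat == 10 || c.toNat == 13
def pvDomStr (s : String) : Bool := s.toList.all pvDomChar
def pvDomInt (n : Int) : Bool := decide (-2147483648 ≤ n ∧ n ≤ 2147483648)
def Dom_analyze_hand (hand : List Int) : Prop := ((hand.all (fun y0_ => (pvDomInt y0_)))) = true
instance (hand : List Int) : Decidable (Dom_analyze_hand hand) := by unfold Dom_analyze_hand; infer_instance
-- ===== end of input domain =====

-- B splits A's single combined bucketing pass into a rank-tally loop plus four per-suit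
-- filtering passes; same O(n) cost, different traversal shape (objective: alternative).

-- ===== PORT A =====
-- CARD_RANK = [(c >> 2) + 2 for c in range(52)]
def CARD_RANK : List Int := (PySem.List.pyRange 0 52 1).map (fun c : Int => (c >>> (2:Nat)) + 2)
-- CARD_SUIT = [c & 3 for c in range(52)]
def CARD_SUIT : List Int := (PySem.List.pyRange 0 52 1).map (fun c : Int => PySem.Int.band c 3)

-- table lookup CARD_RANK[card] / CARD_SUIT[card]; Python raises IndexError outside
-- -52 ≤ card ≤ 51 (excluded by Pre_); the `.getD 0` default is never reached under Pre_.
def tblGet (l : List Int) (i : Int) : Int := (PySem.List.pyGet? l i).getD 0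

def analyze_hand (hand : List Int) : List Int × List (List Int) :=
  hand.foldl
    (fun st card =>
      let rnk := tblGet CARD_RANK card
      let idx := tblGet CARD_SUIT card
      -- rnk ∈ [2,14] and idx ∈ [0,3] under Pre_, so `.toNat` indexing is exact here
      (st.1.modify rnk.toNat (· + 1), st.2.modify idx.toNat (· ++ [rnk])))
    (List.replicate 15 0, [[], [], [], []])

-- ===== PORT B =====
def analyze_hand_alt (hand : List Int) : List Int × List (List Int) :=
  (hand.foldl (fun rc card => rc.modify (tblGet CARD_RANK card).toNat (· + 1))
      (List.replicate 15 0),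
   (PySem.List.pyRange 0 4 1).map
      (fun s => (hand.filter (fun c => tblGet CARD_SUIT c == s)).map
                  (fun c => tblGet CARD_RANK c)))

-- ===== PRECONDITION & SPEC =====
-- Pre_ excludes exactly the cards on which Python's CARD_RANK[card] raises IndexError.
def Pre_analyze_hand (hand : List Int) : Prop := ∀ c ∈ hand, -52 ≤ c ∧ c < 52
instance (hand : List Int) : Decidable (Pre_analyze_hand hand) := by unfold Pre_analyze_hand; infer_instance
def pvWitness_analyze_hand : List Int := [0, 5, 17, 51, -1]

def Spec_analyze_hand (hand : List Int) (out : List Int × List (List Int)) : Prop := out = analyze_hand_alt hand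
instance (hand : List Int) (out : List Int × List (List Int)) : Decidable (Spec_analyze_hand hand out) := by unfold Spec_analyze_hand; infer_instance

-- ===== CLAIM (what is proved, stated in full; the proofs are below) =====
def Claim_equal_analyze_hand : Prop := ∀ (hand : List Int), Dom_analyze_hand hand → Pre_analyze_hand hand → Spec_analyze_hand hand (analyze_hand hand)

-- ===== LEMMAS AND PROOFS =====

-- for an in-range card the suit lookup is one of 0,1,2,3
theorem suit_cases (c : Int) (h1 : -52 ≤ c) (h2 : c < 52) :
    tblGet CARD_SUIT c = 0 ∨ tblGet CARD_SUIT c = 1 ∨ tblGet CARD_SUIT c = 2 ∨ tblGet CARD_SUIT c = 3 := by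
  interval_cases c <;> decide

-- per-suit filtered rank list of B
def suitRanks (s : Int) (hand : List Int) : List Int :=
  (hand.filter (fun c => tblGet CARD_SUIT c == s)).map (fun c => tblGet CARD_RANK c)

-- A's combined fold, with the four suit buckets as explicit accumulators, equals
-- B's tally fold paired with the accumulated per-suit filters.
theorem mod0 (f : List Int → List Int) (b0 b1 b2 b3 : List Int) :
    [b0, b1, b2, b3].modify (Int.toNat 0) f = [f b0, b1, b2, b3] := rfl
theorem mod1 (f : List Int → List Int) (b0 b1 b2 b3 : List Int) :
    [b0, b1, b2, b3].modify (Int.toNat 1) f = [b0, f b1, b2, b3] := rfl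
theorem mod2 (f : List Int → List Int) (b0 b1 b2 b3 : List Int) :
    [b0, b1, b2, b3].modify (Int.toNat 2) f = [b0, b1, f b2, b3] := rfl
theorem mod3 (f : List Int → List Int) (b0 b1 b2 b3 : List Int) :
    [b0, b1, b2, b3].modify (Int.toNat 3) f = [b0, b1, b2, f b3] := rfl

-- A's combined fold, with the four suit buckets as explicit accumulators, equals
-- B's tally fold paired with the accumulated per-suit filters.
theorem main_inv (hand : List Int) (h : ∀ c ∈ hand, -52 ≤ c ∧ c < 52)
    (rc b0 b1 b2 b3 : List Int) :
    hand.foldl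
      (fun st card =>
        let rnk := tblGet CARD_RANK card
        let idx := tblGet CARD_SUIT card
        (st.1.modify rnk.toNat (· + 1), st.2.modify idx.toNat (· ++ [rnk])))
      (rc, [b0, b1, b2, b3])
    = (hand.foldl (fun rc card => rc.modify (tblGet CARD_RANK card).toNat (· + 1)) rc,
       [b0 ++ suitRanks 0 hand, b1 ++ suitRanks 1 hand, b2 ++ suitRanks 2 hand, b3 ++ suitRanks 3 hand]) := by
  induction hand generalizing rc b0 b1 b2 b3 with
  | nil => simp [suitRanks]
  | cons card rest ih =>
    have hc := h card (List.mem_cons_self ..)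
    have hrest : ∀ c ∈ rest, -52 ≤ c ∧ c < 52 := fun c hm => h c (List.mem_cons_of_mem _ hm)
    rcases suit_cases card hc.1 hc.2 with hs | hs | hs | hs <;>
      simp only [List.foldl_cons, hs, mod0, mod1, mod2, mod3] <;>
      rw [ih hrest] <;>
      simp [suitRanks, hs, List.append_assoc]

-- ===== VERDICT (by name: the statement is the Claim_ definition above) =====
theorem analyze_hand_spec : Claim_equal_analyze_hand := by
  intro hand _ hpre
  unfold Spec_analyze_hand analyze_hand analyze_hand_alt
  rw [main_inv hand hpre]
  simp [suitRanks, PySem.List.pyRange, List.range_succ]
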